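-- pv_equiv track=rewrite | github.com/ini/euler | solve.py | problem_30
-- ===== SOURCE A (Python) =====
-- import itertools
-- import string
--
-- def problem_30(n=5):
--     """
--     Find the sum of all numbers (>= 2 digits) that can be written as the sum of the
--     n-th powers of their digits.
--
--     Notes
--     -----
--     A k-digit number is at least 10^(k-1), and the sum of n-th powers of
--     a k-digit number is at most k * 9^n. This means we can upper bound the
--     number of digits by the largest k satisfying 10^(k-1) <= k * 9^n.
--
--     Notice that there are at most ((10 + k - 1) choose k) unique digit power sums,
--     as the order of the digits doesn't matter.
--     """
--     digit_powers = {str(d): d**n for d in range(10)}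
--     digit_power_sum = lambda digits: sum(map(digit_powers.__getitem__, digits))
--
--     # Find upper bound on number of digits
--     k = 2
--     while 10**k <= (k + 1) * 9**n:
--         k += 1
--
--     # Find numbers that satisfy the condition
--     values = set()
--     for digits in itertools.combinations_with_replacement(string.digits, k):
--         a = digit_power_sum(digits)
--         b = digit_power_sum(str(a))
--         if a == b and a >= 10:
--             values.add(a)
--
--     return sum(values)
-- ===== SOURCE B (Python) =====
-- def problem_30(n=5):
--     # Same digit-count bound k as A's docstring derivation.
--     k = 2
--     while 10**k <= (k + 1) * 9**n:
--         k += 1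
--     powers = [d**n for d in range(10)]
--     values = set()
--
--     def rec(d, slots, s):
--         # binary-branch recursion over digit multisets: with slots digits still to
--         # place, either stop using digit d (move to d+1) or use one more copy of d
--         if slots == 0:
--             if s >= 10:
--                 t, ps = s, 0
--                 while t:
--                     ps += powers[t % 10]
--                     t //= 10
--                 if ps == s:
--                     values.add(s)
--         elif d <= 9:
--             rec(d + 1, slots, s)
--             rec(d, slots - 1, s + powers[d])
--
--     rec(0, k, 0)
--     return sum(values)
-- ===== Notes on version B (the rewrite author's own statement) =====
-- stated objective: alternative
-- what changed: Replaces the combinations_with_replacement enumeration of digit multisets (str-keyed dict of digit powers, string-based digit-power sums) by a binary-branch recursion over digit multisets ('skip digit d / use one more copy of d') that carries the partial power sum arithmetically and tests each completed sum with an arithmetic digit loop instead of going through str().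
import Mathlib
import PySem

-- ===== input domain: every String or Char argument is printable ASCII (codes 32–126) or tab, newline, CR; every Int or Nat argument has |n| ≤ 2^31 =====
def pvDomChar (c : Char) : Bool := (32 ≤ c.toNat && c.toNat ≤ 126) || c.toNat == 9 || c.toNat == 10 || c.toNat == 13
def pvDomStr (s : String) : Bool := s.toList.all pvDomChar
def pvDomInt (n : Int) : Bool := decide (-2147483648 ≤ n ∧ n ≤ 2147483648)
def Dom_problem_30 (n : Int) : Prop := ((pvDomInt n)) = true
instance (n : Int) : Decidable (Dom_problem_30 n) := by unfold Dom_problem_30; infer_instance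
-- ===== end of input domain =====

-- B replaces A's combinations_with_replacement enumeration of digit multisets (dict of
-- str-keyed digit powers, string-based digit-power sums) by a binary-branch recursion
-- over digit multisets ('skip digit d / use one more d') carrying the partial power sum
-- arithmetically and testing each completed sum with an arithmetic digit loop
-- (objective: alternative).

-- ===== PORT A =====

-- termination helper for A's `while 10**k <= (k+1)*9**n` loop (cited by decreasing_by)
theorem p30_k_lt (e k : Nat) (h : 10 ^ k ≤ (k + 1) * 9 ^ e) : k < e + 3 := by
  by_contra h'
  obtain ⟨j, rfl⟩ : ∃ j, k = e + 3 + j := ⟨k - (e + 3), by omega⟩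
  have hnine : ∀ e : Nat, (9 + e) * 9 ^ e ≤ 9 * 10 ^ e := by
    intro e
    induction e with
    | zero => norm_num
    | succ e ih =>
      have h9 : (9:Nat) ^ e ≤ 10 ^ e := Nat.pow_le_pow_left (by norm_num) e
      calc (9 + (e + 1)) * 9 ^ (e + 1) = 9 * ((9 + e) * 9 ^ e) + 9 * 9 ^ e := by ring
        _ ≤ 9 * (9 * 10 ^ e) + 9 * 10 ^ e := by omega
        _ = 9 * 10 ^ (e + 1) := by ring
  have hj : j + 1 ≤ 10 ^ j := Nat.lt_pow_self (by norm_num)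
  have h1 : (e + 3 + j + 1) * 9 ^ e ≤ (j + 1) * ((9 + e) * 9 ^ e) := by
    have hle : e + 3 + j + 1 ≤ (j + 1) * (9 + e) := by nlinarith
    calc (e + 3 + j + 1) * 9 ^ e ≤ ((j + 1) * (9 + e)) * 9 ^ e :=
          Nat.mul_le_mul_right _ hle
      _ = (j + 1) * ((9 + e) * 9 ^ e) := by ring
  have h2 : (j + 1) * ((9 + e) * 9 ^ e) ≤ 10 ^ j * (9 * 10 ^ e) :=
    Nat.mul_le_mul hj (hnine e)
  have h3 : 10 ^ j * (9 * 10 ^ e) < 10 ^ (e + 3 + j) := by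
    have hpj : 0 < (10:Nat) ^ j := Nat.pow_pos (by norm_num)
    have hpe : 0 < (10:Nat) ^ e := Nat.pow_pos (by norm_num)
    calc 10 ^ j * (9 * 10 ^ e) < 10 ^ j * (10 * 10 ^ e) := by
          exact Nat.mul_lt_mul_of_le_of_lt (le_refl _) (by omega) hpj
      _ = 10 ^ (e + j + 1) := by ring
      _ ≤ 10 ^ (e + 3 + j) := Nat.pow_le_pow_right (by norm_num) (by omega)
  omega

-- k = 2; while 10**k <= (k+1)*9**n: k += 1   (the same Python lines open A and B)
def p30_boundK (n : Int) (k : Nat) : Nat :=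
  if 10 ^ k ≤ (k + 1) * 9 ^ n.toNat then p30_boundK n (k + 1) else k
termination_by n.toNat + 3 - k
decreasing_by
  have := p30_k_lt n.toNat k (by assumption)
  omega

-- digit_powers = {str(d): d**n for d in range(10)}; d**n = d^(n.toNat) for n ≥ 0 (Pre_)
def p30_digitPowers (n : Int) : PySem.Dict String Int :=
  (PySem.List.pyRange 0 10 1).foldl
    (fun d dd => d.insert (PySem.Int.toStr dd) (dd ^ n.toNat)) PySem.Dict.empty

-- digit_power_sum = lambda digits: sum(map(digit_powers.__getitem__, digits))
-- getD _ 0 is exact here: every key looked up is a decimal-digit string present in the dict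
def p30_dps (D : PySem.Dict String Int) (digits : List Char) : Int :=
  (digits.map (fun c => D.getD (String.ofList [c]) 0)).sum

-- itertools.combinations_with_replacement(pool, k), tuples in CPython's order
def p30_cwr : List Char → Nat → List (List Char)
  | _, 0 => [[]]
  | [], _ + 1 => []
  | x :: xs, k + 1 => (p30_cwr (x :: xs) k).map (fun c => x :: c) ++ p30_cwr xs (k + 1)
termination_by xs k => (k, xs.length)

def problem_30 (n : Int) : Int :=
  let digit_powers := p30_digitPowers n
  let k := p30_boundK n 2
  -- string.digits = "0123456789"
  let values : PySem.Set Int :=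
    (p30_cwr ['0', '1', '2', '3', '4', '5', '6', '7', '8', '9'] k).foldl
      (fun values digits =>
        let a := p30_dps digit_powers digits
        let b := p30_dps digit_powers (PySem.Int.toChars a)   -- digit_power_sum(str(a))
        if a = b ∧ 10 ≤ a then PySem.Set.add values a else values)
      PySem.Set.empty
  values.sum

-- ===== PORT B =====

-- t, ps = s, 0; while t: ps += powers[t % 10]; t //= 10   (accumulator-carrying digit
-- loop; the pyGetD default 0 is never used: 0 <= t % 10 < 10)
def p30B_dsum (powers : List Int) (t s : Int) : Int :=
  if _h : 0 < t then
    p30B_dsum powers (PySem.Int.floordiv t 10)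
      (s + PySem.List.pyGetD powers (PySem.Int.mod t 10) 0)
  else s
termination_by t.toNat
decreasing_by
  rw [PySem.Int.floordiv_eq_ediv_of_pos (by norm_num : (0:Int) < 10)]
  omega

-- rec(d, slots, s): either stop using digit d (d+1) or place one more copy of d;
-- slots is a count and is ported as Nat (Python keeps it ≥ 0: it only decrements
-- below the `slots == 0` return); the mutated closure set `values` is threaded
-- through as an accumulator, with the first recursive call's result fed to the second
def p30B_rec (powers : List Int) : Int → Nat → Int → PySem.Set Int → PySem.Set Int
  | _d, 0, s, values =>
    if 10 ≤ s then
      (if p30B_dsum powers s 0 = s then PySem.Set.add values s else values)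
    else values
  | d, slots + 1, s, values =>
    if _h : d ≤ 9 then
      p30B_rec powers d slots (s + PySem.List.pyGetD powers d 0)
        (p30B_rec powers (d + 1) (slots + 1) s values)
    else values
termination_by d slots _ _ => (slots, (10 - d).toNat)
decreasing_by
  · exact Prod.Lex.right _ (by omega)
  · exact Prod.Lex.left _ _ (by omega)

def problem_30_alt (n : Int) : Int :=
  -- k = 2; while 10**k <= (k+1)*9**n: k += 1   (same lines as in A)
  let k := p30_boundK n 2
  let powers := (PySem.List.pyRange 0 10 1).map (fun dd => dd ^ n.toNat)  -- [d**n for d in range(10)]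
  (p30B_rec powers 0 k 0 PySem.Set.empty).sum

-- ===== PRECONDITION & SPEC =====
-- Pre_ excludes n < 0, where both A and B raise ZeroDivisionError (zero cannot be raised to a negative power)
def Pre_problem_30 (n : Int) : Prop := 0 ≤ n
instance (n : Int) : Decidable (Pre_problem_30 n) := by unfold Pre_problem_30; infer_instance
def pvWitness_problem_30 : Int := 5

def Spec_problem_30 (n : Int) (out : Int) : Prop := out = problem_30_alt n
instance (n : Int) (out : Int) : Decidable (Spec_problem_30 n out) := by unfold Spec_problem_30; infer_instance

-- ===== CLAIM (what is proved, stated in full; the proofs are below) =====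
def Claim_equal_problem_30 : Prop := ∀ (n : Int), Dom_problem_30 n → Pre_problem_30 n → Spec_problem_30 n (problem_30 n)

-- ===== LEMMAS AND PROOFS =====

-- proof-side helper: the n-th-power digit sum of t as a bare arithmetic recursion
def p30_digitPowSum (n : Int) (t : Int) : Int :=
  if _h : 0 < t then
    PySem.Int.mod t 10 ^ n.toNat + p30_digitPowSum n (PySem.Int.floordiv t 10)
  else 0
termination_by t.toNat
decreasing_by
  rw [PySem.Int.floordiv_eq_ediv_of_pos (by norm_num : (0:Int) < 10)]
  omega

-- "0123456789" as a list (proof-side name for the pool A iterates over)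
def p30_pool : List Char := ['0', '1', '2', '3', '4', '5', '6', '7', '8', '9']

-- characterisation of membership in the combinations_with_replacement list
theorem p30_mem_cwr : ∀ (xs : List Char) (k : Nat), xs.Pairwise (· < ·) →
    ∀ c : List Char, (c ∈ p30_cwr xs k ↔ c.length = k ∧ c.Pairwise (· ≤ ·) ∧ ∀ y ∈ c, y ∈ xs) := by
  intro xs k
  induction xs, k using p30_cwr.induct with
  | case1 xs =>
    intro _ c
    simp only [p30_cwr, List.mem_singleton, List.length_eq_zero_iff]
    constructor
    · rintro rfl; simp
    · rintro ⟨rfl, -, -⟩; rfl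
  | case2 k =>
    intro _ c
    simp only [p30_cwr, List.not_mem_nil, false_iff]
    rintro ⟨hl, -, hall⟩
    cases c with
    | nil => simp at hl
    | cons y r => exact absurd (hall y (by simp)) (by simp)
  | case3 x xs k ih1 ih2 =>
    intro hx c
    have hx' : xs.Pairwise (· < ·) := hx.of_cons
    have hxlt : ∀ y ∈ xs, x < y := (List.pairwise_cons.mp hx).1
    simp only [p30_cwr, List.mem_append, List.mem_map]
    constructor
    · rintro (⟨r, hr, rfl⟩ | hc)
      · obtain ⟨hlen, hpw, hmem⟩ := (ih1 hx r).mp hr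
        refine ⟨by simp [hlen], ?_, ?_⟩
        · refine List.pairwise_cons.mpr ⟨?_, hpw⟩
          intro y hy
          rcases List.mem_cons.mp (hmem y hy) with rfl | h
          · exact le_refl _
          · exact (hxlt y h).le
        · intro y hy
          rcases List.mem_cons.mp hy with rfl | hy
          · simp
          · exact hmem y hy
      · obtain ⟨hlen, hpw, hmem⟩ := (ih2 hx') c |>.mp hc
        exact ⟨hlen, hpw, fun y hy => List.mem_cons_of_mem _ (hmem y hy)⟩
    · rintro ⟨hlen, hpw, hmem⟩
      cases c with
      | nil => simp at hlen
      | cons y r =>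
        have hyr : ∀ z ∈ r, y ≤ z := (List.pairwise_cons.mp hpw).1
        have hpr : r.Pairwise (· ≤ ·) := (List.pairwise_cons.mp hpw).2
        rcases List.mem_cons.mp (hmem y (by simp)) with rfl | hyxs
        · left
          exact ⟨r, (ih1 hx r).mpr ⟨by simpa using hlen, hpr, fun z hz => hmem z (by simp [hz])⟩, rfl⟩
        · right
          refine (ih2 hx' (y :: r)).mpr ⟨hlen, hpw, ?_⟩
          intro z hz
          rcases List.mem_cons.mp hz with rfl | hzr
          · exact hyxs
          · rcases List.mem_cons.mp (hmem z (by simp [hzr])) with rfl | h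
            · exact absurd (hxlt y hyxs) (not_lt.mpr (hyr z hzr))
            · exact h

-- looking a digit character up in A's dict gives the n-th power of the digit
theorem p30_lookup (n : Int) (d : Nat) (hd : d < 10) :
    (p30_digitPowers n).getD (String.ofList [Nat.digitChar d]) 0 = (d : Int) ^ n.toNat := by
  have hrange : PySem.List.pyRange 0 10 1 = [0,1,2,3,4,5,6,7,8,9] := by decide
  rw [p30_digitPowers, hrange]
  simp only [List.foldl]
  interval_cases d <;>
    simp [PySem.Dict.getD_insert,
      show PySem.Int.toStr (0:Int) = "0" from by decide, show PySem.Int.toStr (1:Int) = "1" from by decide,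
      show PySem.Int.toStr (2:Int) = "2" from by decide, show PySem.Int.toStr (3:Int) = "3" from by decide,
      show PySem.Int.toStr (4:Int) = "4" from by decide, show PySem.Int.toStr (5:Int) = "5" from by decide,
      show PySem.Int.toStr (6:Int) = "6" from by decide, show PySem.Int.toStr (7:Int) = "7" from by decide,
      show PySem.Int.toStr (8:Int) = "8" from by decide, show PySem.Int.toStr (9:Int) = "9" from by decide,
      show String.ofList ['0'] = "0" from by decide, show String.ofList ['1'] = "1" from by decide,
      show String.ofList ['2'] = "2" from by decide, show String.ofList ['3'] = "3" from by decide,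
      show String.ofList ['4'] = "4" from by decide, show String.ofList ['5'] = "5" from by decide,
      show String.ofList ['6'] = "6" from by decide, show String.ofList ['7'] = "7" from by decide,
      show String.ofList ['8'] = "8" from by decide, show String.ofList ['9'] = "9" from by decide,
      Nat.digitChar]

theorem p30_toDigits_mem (m : Nat) : ∀ c ∈ Nat.toDigits 10 m, ∃ d, d < 10 ∧ c = Nat.digitChar d := by
  induction m using Nat.strong_induction_on with
  | _ m ih =>
    by_cases hm : m < 10
    · rw [Nat.toDigits_of_lt_base hm]
      intro c hc
      simp only [List.mem_singleton] at hc
      exact ⟨m, hm, hc⟩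
    · rw [Nat.toDigits_of_base_le (by norm_num) (le_of_not_gt hm)]
      intro c hc
      rcases List.mem_append.mp hc with h | h
      · exact ih (m / 10) (by omega) c h
      · exact ⟨m % 10, Nat.mod_lt _ (by norm_num), by simpa using h⟩

theorem p30_digitChar_pool (d : Nat) (hd : d < 10) : Nat.digitChar d ∈ p30_pool := by
  interval_cases d <;> decide

-- the dict-driven digit-power sum of str(m) equals the arithmetic digit recursion
theorem p30_dps_toDigits (n : Int) (m : Nat) (hm : 0 < m) :
    p30_dps (p30_digitPowers n) (Nat.toDigits 10 m) = p30_digitPowSum n (m : Int) := by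
  induction m using Nat.strong_induction_on with
  | _ m ih =>
    have hmod : PySem.Int.mod (m : Int) 10 = ((m % 10 : Nat) : Int) := by
      exact_mod_cast PySem.Int.mod_natCast m 10
    have hdiv : PySem.Int.floordiv (m : Int) 10 = ((m / 10 : Nat) : Int) := by
      exact_mod_cast PySem.Int.floordiv_natCast m 10
    rw [p30_digitPowSum, dif_pos (by exact_mod_cast hm), hmod, hdiv]
    by_cases h10 : m < 10
    · rw [Nat.toDigits_of_lt_base h10]
      have hdd : m / 10 = 0 := by omega
      have : p30_digitPowSum n ((m / 10 : Nat) : Int) = 0 := by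
        rw [p30_digitPowSum, dif_neg]; omega
      rw [this, Nat.mod_eq_of_lt h10]
      simp [p30_dps, p30_lookup n m h10]
    · rw [Nat.toDigits_of_base_le (by norm_num) (le_of_not_gt h10)]
      have hpos : 0 < m / 10 := by omega
      have hrec := ih (m / 10) (by omega) hpos
      simp only [p30_dps, List.map_append, List.sum_append] at hrec ⊢
      rw [hrec]
      have : ((Nat.digitChar (m % 10)) :: []).map
          (fun c => (p30_digitPowers n).getD (String.ofList [c]) 0) =
          [((m % 10 : Nat) : Int) ^ n.toNat] := by
        simp [p30_lookup n (m % 10) (Nat.mod_lt _ (by norm_num))]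
      rw [this]
      simp [add_comm]

theorem p30_toChars_nonneg (a : Int) (ha : 0 ≤ a) :
    PySem.Int.toChars a = Nat.toDigits 10 a.toNat := by
  rw [PySem.Int.toChars, if_neg (not_lt.mpr ha)]

theorem p30_boundK_ge (n : Int) (k : Nat) : k ≤ p30_boundK n k := by
  fun_induction p30_boundK with
  | case1 k h ih => omega
  | case2 k h => exact le_refl _

theorem p30_boundK_exit (n : Int) (k : Nat) :
    ¬ 10 ^ (p30_boundK n k) ≤ (p30_boundK n k + 1) * 9 ^ n.toNat := by
  fun_induction p30_boundK with
  | case1 k h ih => exact ih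
  | case2 k h => exact h

-- the central membership characterisation: a value is collected by A's multiset
-- enumeration iff it lies in [10, k*9^n] and is its own digit-power sum
theorem p30_key (n : Int) (hn : 0 < n.toNat) (k : Nat) (hk2 : 2 ≤ k)
    (hklt : k * 9 ^ n.toNat < 10 ^ k) (x : Int) :
    (∃ ds ∈ p30_cwr p30_pool k,
        (p30_dps (p30_digitPowers n) ds =
           p30_dps (p30_digitPowers n) (PySem.Int.toChars (p30_dps (p30_digitPowers n) ds)) ∧
         10 ≤ p30_dps (p30_digitPowers n) ds) ∧
        p30_dps (p30_digitPowers n) ds = x) ↔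
    (10 ≤ x ∧ x ≤ (k : Int) * 9 ^ n.toNat ∧ p30_digitPowSum n x = x) := by
  have hpoolpw : p30_pool.Pairwise (· < ·) := by decide
  constructor
  · rintro ⟨ds, hds, ⟨hab, h10⟩, rfl⟩
    obtain ⟨hlen, -, hmem⟩ := (p30_mem_cwr p30_pool k hpoolpw ds).mp hds
    refine ⟨h10, ?_, ?_⟩
    · -- the sum of k digit powers is at most k * 9^n
      have hbound : ∀ v ∈ ds.map (fun c => (p30_digitPowers n).getD (String.ofList [c]) 0),
          v ≤ (9 : Int) ^ n.toNat := by
        intro v hv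
        obtain ⟨c, hc, rfl⟩ := List.mem_map.mp hv
        obtain ⟨d, hdlt, rfl⟩ : ∃ d, d < 10 ∧ c = Nat.digitChar d := by
          have := hmem c hc
          fin_cases this
          exacts [⟨0, by norm_num, rfl⟩, ⟨1, by norm_num, rfl⟩, ⟨2, by norm_num, rfl⟩,
            ⟨3, by norm_num, rfl⟩, ⟨4, by norm_num, rfl⟩, ⟨5, by norm_num, rfl⟩,
            ⟨6, by norm_num, rfl⟩, ⟨7, by norm_num, rfl⟩, ⟨8, by norm_num, rfl⟩,
            ⟨9, by norm_num, rfl⟩]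
        rw [p30_lookup n d hdlt]
        exact pow_le_pow_left₀ (by positivity) (by exact_mod_cast (by omega : d ≤ 9)) _
      have := List.sum_le_card_nsmul _ _ hbound
      rw [List.length_map, hlen, nsmul_eq_mul] at this
      exact this
    · -- a = b rephrased through the arithmetic digit loop
      set a := p30_dps (p30_digitPowers n) ds with ha
      have ha0 : 0 ≤ a := by omega
      have hapos : 0 < a.toNat := by omega
      have : p30_dps (p30_digitPowers n) (PySem.Int.toChars a) = p30_digitPowSum n a := by
        rw [p30_toChars_nonneg a ha0, p30_dps_toDigits n a.toNat hapos,
          Int.toNat_of_nonneg ha0]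
      rw [this] at hab
      exact hab.symm
  · rintro ⟨h10, hle, hq⟩
    have hx0 : 0 ≤ x := by omega
    set M := x.toNat with hM
    have hMx : (M : Int) = x := Int.toNat_of_nonneg hx0
    have hM10 : 10 ≤ M := by omega
    have hMle : M ≤ k * 9 ^ n.toNat := by
      have : (M : Int) ≤ ((k * 9 ^ n.toNat : Nat) : Int) := by push_cast; rw [hMx]; exact_mod_cast hle
      exact_mod_cast this
    have hMlt : M < 10 ^ k := lt_of_le_of_lt hMle hklt
    set L := Nat.toDigits 10 M with hL
    have hLlen : L.length ≤ k := Nat.toDigits_length 10 M k (by omega) hMlt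
    set padded := List.replicate (k - L.length) '0' ++ L with hpadded
    set ds := padded.mergeSort (fun a b => decide (a ≤ b)) with hds
    have hperm : ds.Perm padded := List.mergeSort_perm _ _
    -- value of the dict-driven sum on ds
    have hval : p30_dps (p30_digitPowers n) ds = x := by
      have hmapperm := hperm.map (fun c => (p30_digitPowers n).getD (String.ofList [c]) 0)
      have h1 : p30_dps (p30_digitPowers n) ds = p30_dps (p30_digitPowers n) padded := by
        simp only [p30_dps]
        exact hmapperm.sum_eq
      have hzero : p30_dps (p30_digitPowers n) (List.replicate (k - L.length) '0') = 0 := by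
        simp only [p30_dps, List.map_replicate]
        have : (p30_digitPowers n).getD (String.ofList ['0']) 0 = 0 := by
          have := p30_lookup n 0 (by norm_num)
          simpa [zero_pow (by omega : n.toNat ≠ 0)] using this
        rw [this, List.sum_replicate, smul_zero]
      have hdig : p30_dps (p30_digitPowers n) L = x := by
        rw [hL, p30_dps_toDigits n M (by omega), hMx, hq]
      rw [h1, hpadded]
      simp only [p30_dps, List.map_append, List.sum_append] at hzero hdig ⊢
      rw [hzero, hdig, zero_add]
    refine ⟨ds, ?_, ⟨?_, ?_⟩, hval⟩
    · refine (p30_mem_cwr p30_pool k hpoolpw ds).mpr ⟨?_, ?_, ?_⟩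
      · rw [hperm.length_eq, hpadded, List.length_append, List.length_replicate]
        omega
      · have hsorted := List.pairwise_mergeSort
          (le := fun a b : Char => decide (a ≤ b))
          (fun a b c hab hbc => by
            simp only [decide_eq_true_eq] at *
            exact le_trans hab hbc)
          (fun a b => by
            simp only [Bool.or_eq_true, decide_eq_true_eq]
            exact le_total a b)
          padded
        exact hsorted.imp (fun h => of_decide_eq_true h)
      · intro y hy
        rcases List.mem_append.mp (hperm.mem_iff.mp hy) with h | h
        · rw [List.eq_of_mem_replicate h]; decide
        · obtain ⟨d, hdlt, rfl⟩ := p30_toDigits_mem M y h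
          exact p30_digitChar_pool d hdlt
    · rw [hval, p30_toChars_nonneg x hx0, p30_dps_toDigits n M (by omega), hMx, hq]
    · rw [hval]; exact h10

-- A's fold written as a set of values
theorem p30_A_eq (n : Int) : problem_30 n =
    (PySem.Set.ofList (((p30_cwr p30_pool (p30_boundK n 2)).filter
      (fun ds => decide (p30_dps (p30_digitPowers n) ds =
          p30_dps (p30_digitPowers n) (PySem.Int.toChars (p30_dps (p30_digitPowers n) ds)) ∧
        10 ≤ p30_dps (p30_digitPowers n) ds))).map
      (fun ds => p30_dps (p30_digitPowers n) ds))).sum := by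
  rw [problem_30]
  rw [PySem.List.foldl_ite_eq_foldl_filter
    (p := fun ds => p30_dps (p30_digitPowers n) ds =
        p30_dps (p30_digitPowers n) (PySem.Int.toChars (p30_dps (p30_digitPowers n) ds)) ∧
      10 ≤ p30_dps (p30_digitPowers n) ds)
    (f := fun acc ds => PySem.Set.add acc (p30_dps (p30_digitPowers n) ds))]
  rw [← List.foldl_map (f := fun ds => p30_dps (p30_digitPowers n) ds)
    (g := PySem.Set.add)]
  rw [show (PySem.Set.empty : PySem.Set Int) = ([] : List Int) from rfl,
    ← PySem.Set.ofList_eq_foldl]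
  rfl

-- B's accumulator-carrying digit loop equals the bare arithmetic digit recursion
theorem p30B_dsum_eq (n : Int) : ∀ (t s : Int),
    p30B_dsum ((PySem.List.pyRange 0 10 1).map (fun d => d ^ n.toNat)) t s =
      s + p30_digitPowSum n t := by
  suffices H : ∀ (N : Nat) (t s : Int), t.toNat ≤ N →
      p30B_dsum ((PySem.List.pyRange 0 10 1).map (fun d => d ^ n.toNat)) t s =
        s + p30_digitPowSum n t from fun t s => H t.toNat t s le_rfl
  intro N
  induction N with
  | zero =>
    intro t s ht
    rw [p30B_dsum, p30_digitPowSum, dif_neg (by omega), dif_neg (by omega), add_zero]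
  | succ N ihN =>
    intro t s hpos
    by_cases h : 0 < t
    · rw [p30B_dsum, p30_digitPowSum, dif_pos h, dif_pos h]
      rw [PySem.List.pyGetD_map_pyRange_of_nonneg _ _ _ _
        (PySem.Int.mod_nonneg t (by norm_num)) (PySem.Int.mod_lt t (by norm_num))]
      rw [ihN _ _ ?_]
      · ring
      · have := PySem.Int.floordiv_eq_ediv_of_pos (a := t) (b := 10) (by norm_num)
        rw [this]
        omega
    · rw [p30B_dsum, p30_digitPowSum, dif_neg h, dif_neg h, add_zero]

-- the n-th-power sum over Nat.digits equals the arithmetic digit recursion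
theorem p30_digits_sum (n : Int) : ∀ (M : Nat),
    ((Nat.digits 10 M).map (fun (i : Nat) => (i : Int) ^ n.toNat)).sum = p30_digitPowSum n (M : Int) := by
  intro M
  induction M using Nat.strong_induction_on with
  | _ M ih =>
    by_cases hM : 0 < M
    · have hmod : PySem.Int.mod (M : Int) 10 = ((M % 10 : Nat) : Int) := by
        exact_mod_cast PySem.Int.mod_natCast M 10
      have hdiv : PySem.Int.floordiv (M : Int) 10 = ((M / 10 : Nat) : Int) := by
        exact_mod_cast PySem.Int.floordiv_natCast M 10
      rw [Nat.digits_def' (by norm_num : 1 < 10) hM, List.map_cons, List.sum_cons,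
        ih (M / 10) (by omega)]
      conv_rhs => rw [p30_digitPowSum]
      rw [dif_pos (by exact_mod_cast hM : (0 : Int) < (M : Int)), hmod, hdiv]
    · have : M = 0 := by omega
      subst this
      rw [p30_digitPowSum, dif_neg (by norm_num)]
      simp

-- what the branching recursion can still add from state (d, slots, s): some multiset
-- of `slots` digits ≥ d completes s to x, and x passes the candidate test
def p30_G (n : Int) (d : Int) (slots : Nat) (s x : Int) : Prop :=
  ∃ l : List Nat, l.length = slots ∧ (∀ i ∈ l, d ≤ (i : Int) ∧ i < 10) ∧
    x = s + (l.map (fun (i : Nat) => (i : Int) ^ n.toNat)).sum ∧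
    10 ≤ x ∧ p30_digitPowSum n x = x

theorem p30_G_zero (n : Int) (d s x : Int) :
    p30_G n d 0 s x ↔ x = s ∧ 10 ≤ s ∧ p30_digitPowSum n s = s := by
  constructor
  · rintro ⟨l, hlen, -, hx, h10, hfix⟩
    rw [List.length_eq_zero_iff] at hlen
    subst hlen
    simp only [List.map_nil, List.sum_nil, add_zero] at hx
    subst hx
    exact ⟨rfl, h10, hfix⟩
  · rintro ⟨rfl, h10, hfix⟩
    exact ⟨[], rfl, by simp, by simp, h10, hfix⟩

-- splitting on whether the digit d itself is used again
theorem p30_G_split (n : Int) (d : Int) (hd0 : 0 ≤ d) (hd : d ≤ 9) (slots : Nat) (s x : Int) :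
    p30_G n d (slots + 1) s x ↔
      p30_G n (d + 1) (slots + 1) s x ∨ p30_G n d slots (s + d ^ n.toNat) x := by
  have hdN : ((d.toNat : Nat) : Int) = d := Int.toNat_of_nonneg hd0
  constructor
  · rintro ⟨l, hlen, hmem, hx, h10, hfix⟩
    by_cases hdl : d.toNat ∈ l
    · right
      refine ⟨l.erase d.toNat, ?_, ?_, ?_, h10, hfix⟩
      · rw [List.length_erase_of_mem hdl, hlen]
        omega
      · intro i hi
        exact hmem i (List.mem_of_mem_erase hi)
      · have hperm : l.Perm (d.toNat :: l.erase d.toNat) := List.perm_cons_erase hdl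
        have := (hperm.map (fun (i : Nat) => (i : Int) ^ n.toNat)).sum_eq
        rw [hx, this, List.map_cons, List.sum_cons, hdN]
        ring
    · left
      refine ⟨l, hlen, ?_, hx, h10, hfix⟩
      intro i hi
      have h1 := hmem i hi
      have h2 : (i : Int) ≠ d := by
        intro hEq
        apply hdl
        have : i = d.toNat := by omega
        rwa [← this]
      constructor
      · omega
      · exact h1.2
  · rintro (⟨l, hlen, hmem, hx, h10, hfix⟩ | ⟨l, hlen, hmem, hx, h10, hfix⟩)
    · refine ⟨l, hlen, ?_, hx, h10, hfix⟩
      intro i hi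
      have := hmem i hi
      omega
    · refine ⟨d.toNat :: l, by simp [hlen], ?_, ?_, h10, hfix⟩
      · intro i hi
        rcases List.mem_cons.mp hi with rfl | hi'
        · constructor
          · omega
          · omega
        · exact hmem i hi'
      · rw [List.map_cons, List.sum_cons, hdN, hx]
        ring

-- no digit is ≥ 10: states with d > 9 and slots left contribute nothing
theorem p30_G_dead (n : Int) (d : Int) (hd : ¬ d ≤ 9) (slots : Nat) (s x : Int) :
    ¬ p30_G n d (slots + 1) s x := by
  rintro ⟨l, hlen, hmem, -, -, -⟩
  cases l with
  | nil => simp at hlen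
  | cons i t =>
    have := hmem i (by simp)
    omega

-- membership in the result of the branching recursion
theorem p30B_rec_mem (n : Int) : ∀ (d : Int) (slots : Nat) (s : Int) (values : PySem.Set Int),
    0 ≤ d →
    ∀ x, (x ∈ p30B_rec ((PySem.List.pyRange 0 10 1).map (fun dd => dd ^ n.toNat))
        d slots s values ↔ x ∈ values ∨ p30_G n d slots s x) := by
  intro d slots s values
  induction d, slots, s, values using p30B_rec.induct
    (powers := (PySem.List.pyRange 0 10 1).map (fun dd => dd ^ n.toNat)) with
  | case1 d s values h10 hfix =>
    intro _ x
    have hfix' : p30_digitPowSum n s = s := by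
      rw [p30B_dsum_eq n s 0, zero_add] at hfix
      exact hfix
    rw [p30B_rec, if_pos h10, if_pos hfix, PySem.Set.mem_add, p30_G_zero]
    constructor
    · rintro (h | rfl)
      · exact Or.inl h
      · exact Or.inr ⟨rfl, h10, hfix'⟩
    · rintro (h | ⟨rfl, -, -⟩)
      · exact Or.inl h
      · exact Or.inr rfl
  | case2 d s values h10 hfix =>
    intro _ x
    have hfix' : ¬ p30_digitPowSum n s = s := by
      rw [p30B_dsum_eq n s 0, zero_add] at hfix
      exact hfix
    rw [p30B_rec, if_pos h10, if_neg hfix, p30_G_zero]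
    constructor
    · exact Or.inl
    · rintro (h | ⟨rfl, -, hfix''⟩)
      · exact h
      · exact absurd hfix'' hfix'
  | case3 d s values h10 =>
    intro _ x
    rw [p30B_rec, if_neg h10, p30_G_zero]
    constructor
    · exact Or.inl
    · rintro (h | ⟨rfl, h10', -⟩)
      · exact h
      · exact absurd h10' h10
  | case4 d slots s values h ih1 ih2 =>
    intro hd0 x
    rw [p30B_rec, dif_pos h]
    have hget : PySem.List.pyGetD
        ((PySem.List.pyRange 0 10 1).map (fun dd => dd ^ n.toNat)) d 0 = d ^ n.toNat :=
      PySem.List.pyGetD_map_pyRange_of_nonneg _ _ _ _ hd0 (by omega)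
    rw [hget] at ih2 ⊢
    rw [ih2 hd0 x, ih1 (by omega) x, p30_G_split n d hd0 h slots s x]
    tauto
  | case5 d slots s values h =>
    intro _ x
    rw [p30B_rec, dif_neg h]
    constructor
    · exact Or.inl
    · rintro (hx | hG)
      · exact hx
      · exact absurd hG (p30_G_dead n d h slots s x)

theorem p30B_rec_nodup (powers : List Int) : ∀ (d : Int) (slots : Nat) (s : Int)
    (values : PySem.Set Int), values.Nodup →
    (p30B_rec powers d slots s values).Nodup := by
  intro d slots s values
  induction d, slots, s, values using p30B_rec.induct (powers := powers) with
  | case1 d s values h10 hfix =>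
    intro h
    rw [p30B_rec, if_pos h10, if_pos hfix]
    exact PySem.Set.nodup_add values s h
  | case2 d s values h10 hfix =>
    intro h
    rw [p30B_rec, if_pos h10, if_neg hfix]
    exact h
  | case3 d s values h10 =>
    intro h
    rw [p30B_rec, if_neg h10]
    exact h
  | case4 d slots s values hle ih1 ih2 =>
    intro h
    rw [p30B_rec, dif_pos hle]
    exact ih2 (ih1 h)
  | case5 d slots s values hle =>
    intro h
    rw [p30B_rec, dif_neg hle]
    exact h

-- B collects exactly the range-bounded fixed points of the digit-power sum
theorem p30_keyB (n : Int) (hn : 0 < n.toNat) (k : Nat)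
    (hklt : k * 9 ^ n.toNat < 10 ^ k) (x : Int) :
    (x ∈ p30B_rec ((PySem.List.pyRange 0 10 1).map (fun dd => dd ^ n.toNat))
        0 k 0 PySem.Set.empty) ↔
      (10 ≤ x ∧ x ≤ (k : Int) * 9 ^ n.toNat ∧ p30_digitPowSum n x = x) := by
  rw [p30B_rec_mem n 0 k 0 _ le_rfl x]
  have hempty : x ∈ (PySem.Set.empty : PySem.Set Int) ↔ False := by
    simp [PySem.Set.empty]
  rw [hempty, false_or]
  constructor
  · rintro ⟨l, hlen, hmem, hx, h10, hfix⟩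
    refine ⟨h10, ?_, hfix⟩
    have hbound : ∀ v ∈ l.map (fun (i : Nat) => (i : Int) ^ n.toNat),
        v ≤ (9 : Int) ^ n.toNat := by
      intro v hv
      obtain ⟨i, hi, rfl⟩ := List.mem_map.mp hv
      have hi9 : ((i : Nat) : Int) ≤ 9 := by
        have := (hmem i hi).2
        omega
      exact pow_le_pow_left₀ (by positivity) hi9 _
    have := List.sum_le_card_nsmul _ _ hbound
    rw [List.length_map, hlen, nsmul_eq_mul] at this
    rw [hx, zero_add]
    exact this
  · rintro ⟨h10, hle, hfix⟩
    have hx0 : 0 ≤ x := by omega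
    set M := x.toNat with hM
    have hMx : (M : Int) = x := Int.toNat_of_nonneg hx0
    have hMle : M ≤ k * 9 ^ n.toNat := by
      have : (M : Int) ≤ ((k * 9 ^ n.toNat : Nat) : Int) := by
        push_cast; rw [hMx]; exact_mod_cast hle
      exact_mod_cast this
    have hMlt : M < 10 ^ k := lt_of_le_of_lt hMle hklt
    have hdlen : (Nat.digits 10 M).length ≤ k :=
      (Nat.digits_length_le_iff (by norm_num) M).mpr hMlt
    refine ⟨Nat.digits 10 M ++ List.replicate (k - (Nat.digits 10 M).length) 0,
      ?_, ?_, ?_, h10, hfix⟩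
    · rw [List.length_append, List.length_replicate]
      omega
    · intro i hi
      rcases List.mem_append.mp hi with h | h
      · exact ⟨by positivity, Nat.digits_lt_base (by norm_num) h⟩
      · rw [List.eq_of_mem_replicate h]
        exact ⟨le_rfl, by norm_num⟩
    · rw [List.map_append, List.sum_append, List.map_replicate]
      rw [show (((0 : Nat) : Int)) ^ n.toNat = 0 from by
        rw [Nat.cast_zero, zero_pow (by omega : n.toNat ≠ 0)]]
      rw [List.sum_replicate, smul_zero, add_zero, p30_digits_sum n M, hMx, hfix,
        zero_add]

-- for n = 0 both programs return 0: every 2-digit multiset has power sum 2 < 10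
theorem p30_main_zero (n : Int) (hn0 : n.toNat = 0) : problem_30 n = problem_30_alt n := by
  have hkval : p30_boundK n 2 = 2 := by
    rw [p30_boundK, hn0, if_neg (by norm_num)]
  have hfil : (p30_cwr p30_pool 2).filter
      (fun ds => decide (p30_dps (p30_digitPowers n) ds =
          p30_dps (p30_digitPowers n) (PySem.Int.toChars (p30_dps (p30_digitPowers n) ds)) ∧
        10 ≤ p30_dps (p30_digitPowers n) ds)) = [] := by
    rw [List.filter_eq_nil_iff]
    intro ds hds
    obtain ⟨hlen, -, hmem⟩ := (p30_mem_cwr p30_pool 2 (by decide) ds).mp hds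
    have hone : ∀ v ∈ ds.map (fun c => (p30_digitPowers n).getD (String.ofList [c]) 0),
        v = (1 : Int) := by
      intro v hv
      obtain ⟨c, hc, rfl⟩ := List.mem_map.mp hv
      obtain ⟨d, hdlt, rfl⟩ : ∃ d, d < 10 ∧ c = Nat.digitChar d := by
        have := hmem c hc
        fin_cases this
        exacts [⟨0, by norm_num, rfl⟩, ⟨1, by norm_num, rfl⟩, ⟨2, by norm_num, rfl⟩,
          ⟨3, by norm_num, rfl⟩, ⟨4, by norm_num, rfl⟩, ⟨5, by norm_num, rfl⟩,
          ⟨6, by norm_num, rfl⟩, ⟨7, by norm_num, rfl⟩, ⟨8, by norm_num, rfl⟩,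
          ⟨9, by norm_num, rfl⟩]
      rw [p30_lookup n d hdlt, hn0, pow_zero]
    have hsum : p30_dps (p30_digitPowers n) ds = 2 := by
      rw [p30_dps, List.sum_eq_card_nsmul _ 1 hone]
      simp [hlen]
    simp only [decide_eq_true_eq, not_and]
    intro _
    rw [hsum]
    norm_num
  have hBempty : p30B_rec ((PySem.List.pyRange 0 10 1).map (fun dd => dd ^ n.toNat))
      0 2 0 PySem.Set.empty = [] := by
    rw [List.eq_nil_iff_forall_not_mem]
    intro x hx
    rw [p30B_rec_mem n 0 2 0 _ le_rfl x] at hx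
    rcases hx with h | ⟨l, hlen, -, hx, h10, -⟩
    · simp [PySem.Set.empty] at h
    · have hone : ∀ v ∈ l.map (fun (i : Nat) => (i : Int) ^ n.toNat), v = (1 : Int) := by
        intro v hv
        obtain ⟨i, hi, rfl⟩ := List.mem_map.mp hv
        rw [hn0, pow_zero]
      rw [List.sum_eq_card_nsmul _ 1 hone, List.length_map, hlen] at hx
      simp only [nsmul_eq_mul, mul_one, zero_add] at hx
      omega
  have hBv : problem_30_alt n = 0 := by
    simp only [problem_30_alt]
    rw [hkval, hBempty]
    rfl
  rw [p30_A_eq, hkval, hfil, hBv]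
  simp [PySem.Set.ofList]

theorem p30_main (n : Int) (_hpre : 0 ≤ n) : problem_30 n = problem_30_alt n := by
  by_cases hn0 : n.toNat = 0
  · exact p30_main_zero n hn0
  · have hn : 0 < n.toNat := by omega
    set k := p30_boundK n 2 with hk
    have hk2 : 2 ≤ k := p30_boundK_ge n 2
    have hklt : k * 9 ^ n.toNat < 10 ^ k := by
      have hexit := p30_boundK_exit n 2
      rw [← hk] at hexit
      have h9 : 0 < (9:Nat) ^ n.toNat := Nat.pow_pos (by norm_num)
      nlinarith [Nat.lt_of_not_le hexit]
    have hA := p30_A_eq n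
    rw [← hk] at hA
    have hBv : problem_30_alt n =
        (p30B_rec ((PySem.List.pyRange 0 10 1).map (fun dd => dd ^ n.toNat))
          0 k 0 PySem.Set.empty).sum := by
      simp only [problem_30_alt]
      rw [← hk]
    rw [hA, hBv]
    apply List.Perm.sum_eq
    rw [List.perm_ext_iff_of_nodup (PySem.Set.nodup_ofList _)
      (p30B_rec_nodup _ 0 k 0 PySem.Set.empty (by simp [PySem.Set.empty]))]
    intro x
    rw [PySem.Set.mem_ofList, p30_keyB n hn k hklt x]
    constructor
    · intro hx
      obtain ⟨ds, hds, rfl⟩ := List.mem_map.mp hx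
      obtain ⟨hmem, hcond⟩ := List.mem_filter.mp hds
      rw [decide_eq_true_eq] at hcond
      exact (p30_key n hn k hk2 hklt _).mp ⟨ds, hmem, hcond, rfl⟩
    · intro hx
      obtain ⟨ds, hds, hcond, hval⟩ := (p30_key n hn k hk2 hklt x).mpr hx
      exact List.mem_map.mpr ⟨ds,
        List.mem_filter.mpr ⟨hds, by rw [decide_eq_true_eq]; exact hcond⟩, hval⟩

-- ===== VERDICT (by name: the statement is the Claim_ definition above) =====
theorem problem_30_spec : Claim_equal_problem_30 := by
  intro n _ hpre
  exact p30_main n hpre
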